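-- pv_equiv track=rewrite | github.com/danimelsz/PrepDyn | src/prepDyn_auxiliary.py | detect_fully_missing_partitions
-- ===== SOURCE A (Python) =====
-- def detect_fully_missing_partitions(alignment):
--     """
--     Logs all `?` and `-` from fully missing partitions.
--     A fully missing partition is a region (between #) in which a sequence has only dashes.
--     """
--     log_entries = []
--     total_question_marks = 0
--     total_dash_from_missing_partitions = 0
--
--     for seq_id, seq in alignment.items():
--         total_question_marks += seq.count("?")
--
--         parts = seq.split("#")
--         col_index = 0  # absolute position tracker
--         for i, part in enumerate(parts):
--             if all(c == '-' for c in part):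
--                 dash_count = len(part)
--                 total_dash_from_missing_partitions += dash_count
--                 start = col_index
--                 end = col_index + dash_count - 1
--                 log_entries.append(f"{seq_id}: partition {i} ({start}–{end}, length {dash_count}) fully missing (all '-')")
--             col_index += len(part) + 1  # +1 for the '#' removed in split
--
--     summary = (
--         f"Total '?' characters: {total_question_marks}\n"
--         f"Total '-' characters in fully missing partitions: {total_dash_from_missing_partitions}\n"
--         f"Combined total: {total_question_marks + total_dash_from_missing_partitions}\n"
--     )
--
--     return summary + "\n" + "\n".join(log_entries)
-- ===== SOURCE B (Python) =====
-- def detect_fully_missing_partitions(alignment):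
--     """Single forward scan per sequence instead of split(): track the current
--     partition's start, length and an all-dash flag, finalizing at each '#'
--     and once at the end."""
--     log_entries = []
--     total_question_marks = 0
--     total_dash = 0
--
--     for seq_id, seq in alignment.items():
--         total_question_marks += seq.count("?")
--         i = 0
--         start = 0
--         length = 0
--         all_dash = True
--         for ch in seq:
--             if ch == '#':
--                 if all_dash:
--                     total_dash += length
--                     log_entries.append(
--                         f"{seq_id}: partition {i} ({start}–{start + length - 1}, length {length}) fully missing (all '-')")
--                 i += 1
--                 start = start + length + 1
--                 length = 0
--                 all_dash = True
--             else:
--                 length += 1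
--                 if ch != '-':
--                     all_dash = False
--         if all_dash:
--             total_dash += length
--             log_entries.append(
--                 f"{seq_id}: partition {i} ({start}–{start + length - 1}, length {length}) fully missing (all '-')")
--
--     summary = (
--         f"Total '?' characters: {total_question_marks}\n"
--         f"Total '-' characters in fully missing partitions: {total_dash}\n"
--         f"Combined total: {total_question_marks + total_dash}\n"
--     )
--     return summary + "\n" + "\n".join(log_entries)
-- ===== Notes on version B (the rewrite author's own statement) =====
-- stated objective: alternative
-- what changed: Replaced the split('#')-then-enumerate pass with a single forward character scan per sequence that maintains the current partition's start, length and an all-dash flag, finalizing at each '#' and at end of string.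
import Mathlib
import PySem

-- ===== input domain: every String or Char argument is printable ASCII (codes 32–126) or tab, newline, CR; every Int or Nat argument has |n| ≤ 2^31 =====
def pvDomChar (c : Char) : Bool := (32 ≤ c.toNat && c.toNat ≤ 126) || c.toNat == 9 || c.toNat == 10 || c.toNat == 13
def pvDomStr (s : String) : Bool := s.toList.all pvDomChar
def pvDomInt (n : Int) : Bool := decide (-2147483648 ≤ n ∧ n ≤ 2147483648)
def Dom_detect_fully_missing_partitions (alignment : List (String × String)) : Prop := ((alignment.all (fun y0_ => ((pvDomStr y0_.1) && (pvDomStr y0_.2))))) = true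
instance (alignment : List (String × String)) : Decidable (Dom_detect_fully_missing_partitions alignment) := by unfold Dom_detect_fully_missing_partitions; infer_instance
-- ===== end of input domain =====

-- B replaces A's split('#')-then-enumerate pass by a single forward character scan per
-- sequence (objective: alternative decomposition, same cost).

-- the f-string both Pythons share, literally
def pvEntry (sid : String) (i start endc len : Int) : String :=
  sid ++ ": partition " ++ PySem.Int.toStr i ++ " (" ++ PySem.Int.toStr start ++ "–"
    ++ PySem.Int.toStr endc ++ ", length " ++ PySem.Int.toStr len ++ ") fully missing (all '-')"

def pvSummary (q d : Int) (entries : List String) : String :=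
  ("Total '?' characters: " ++ PySem.Int.toStr q ++ "\n"
    ++ "Total '-' characters in fully missing partitions: " ++ PySem.Int.toStr d ++ "\n"
    ++ "Combined total: " ++ PySem.Int.toStr (q + d) ++ "\n")
  ++ "\n" ++ PySem.Str.join "\n" entries

-- ===== PORT A =====
-- for i, part in enumerate(parts): … ; col_index += len(part) + 1
def pvAInner (sid : String) (parts : List (List Char)) (i col d : Int) (e : List String) : Int × List String :=
  match parts with
  | [] => (d, e)
  | p :: rest =>
    if p.all (fun c => c == '-') then
      pvAInner sid rest (i + 1) (col + (p.length : Int) + 1) (d + (p.length : Int))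
        (e ++ [pvEntry sid i col (col + (p.length : Int) - 1) (p.length : Int)])
    else
      pvAInner sid rest (i + 1) (col + (p.length : Int) + 1) d e

def detect_fully_missing_partitions (alignment : List (String × String)) : String :=
  let st := alignment.foldl (fun (st : List String × Int × Int) kv =>
    let q := st.2.1 + (PySem.Str.count kv.2 "?" : Int)
    let parts := PySem.Chars.splitOn kv.2.toList "#".toList
    let de := pvAInner kv.1 parts 0 0 st.2.2 st.1
    (de.2, q, de.1)) ([], 0, 0)
  pvSummary st.2.1 st.2.2 st.1

-- ===== PORT B =====
-- single scan: state (i, start, length, all_dash); finalize at '#' and at the end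
def pvBScan (sid : String) (cs : List Char) (i start len : Int) (ad : Bool) (d : Int) (e : List String) : Int × List String :=
  match cs with
  | [] =>
    if ad then (d + len, e ++ [pvEntry sid i start (start + len - 1) len]) else (d, e)
  | c :: rest =>
    if c == '#' then
      let de := if ad then (d + len, e ++ [pvEntry sid i start (start + len - 1) len]) else (d, e)
      pvBScan sid rest (i + 1) (start + len + 1) 0 true de.1 de.2
    else
      pvBScan sid rest i start (len + 1) (ad && (c == '-')) d e

def detect_fully_missing_partitions_alt (alignment : List (String × String)) : String :=
  let st := alignment.foldl (fun (st : List String × Int × Int) kv =>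
    let q := st.2.1 + (PySem.Str.count kv.2 "?" : Int)
    let de := pvBScan kv.1 kv.2.toList 0 0 0 true st.2.2 st.1
    (de.2, q, de.1)) ([], 0, 0)
  pvSummary st.2.1 st.2.2 st.1

-- ===== PRECONDITION & SPEC =====
def Spec_detect_fully_missing_partitions (alignment : List (String × String)) (out : String) : Prop := out = detect_fully_missing_partitions_alt alignment
instance (alignment : List (String × String)) (out : String) : Decidable (Spec_detect_fully_missing_partitions alignment out) := by unfold Spec_detect_fully_missing_partitions; infer_instance

-- ===== CLAIM (what is proved, stated in full; the proofs are below) =====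
def Claim_equal_detect_fully_missing_partitions : Prop := ∀ (alignment : List (String × String)), Dom_detect_fully_missing_partitions alignment → Spec_detect_fully_missing_partitions alignment (detect_fully_missing_partitions alignment)

-- ===== LEMMAS AND PROOFS =====

-- reference recursion for PySem.Chars.splitOn.go on the single-char separator ['#']
def pvGoSpec (l cur : List Char) (acc : List (List Char)) : List (List Char) :=
  match l with
  | [] => (cur.reverse :: acc).reverse
  | c :: rest => if c = '#' then pvGoSpec rest [] (cur.reverse :: acc) else pvGoSpec rest (c :: cur) acc

theorem pvGo_eq (l : List Char) : ∀ (fuel : Nat) (cur : List Char) (acc : List (List Char)),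
    l.length ≤ fuel → PySem.Chars.splitOn.go ['#'] fuel l cur acc = pvGoSpec l cur acc := by
  induction l with
  | nil =>
    intro fuel cur acc _
    cases fuel <;> simp [PySem.Chars.splitOn.go, pvGoSpec]
  | cons c rest ih =>
    intro fuel cur acc h
    cases fuel with
    | zero => simp at h
    | succ f =>
      by_cases hc : c = '#'
      · subst hc
        simp [PySem.Chars.splitOn.go, List.isPrefixOf, pvGoSpec, ih f _ _ (by simpa using h)]
      · have : (['#'].isPrefixOf (c :: rest)) = false := by
          simp [List.isPrefixOf]; exact fun h' => (hc h'.symm).elim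
        simp [PySem.Chars.splitOn.go, this, pvGoSpec, hc, ih f _ _ (by simpa using h)]

theorem pvSplitOn_eq (l : List Char) : PySem.Chars.splitOn l ['#'] = pvGoSpec l [] [] := by
  unfold PySem.Chars.splitOn
  exact pvGo_eq l (l.length + 1) [] [] (by omega)

theorem pvGoSpec_acc (l : List Char) : ∀ (cur : List Char) (acc : List (List Char)),
    pvGoSpec l cur acc = acc.reverse ++ pvGoSpec l cur [] := by
  induction l with
  | nil => intro cur acc; simp [pvGoSpec]
  | cons c rest ih =>
    intro cur acc
    by_cases hc : c = '#'
    · subst hc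
      show pvGoSpec rest [] (cur.reverse :: acc) = acc.reverse ++ pvGoSpec rest [] [cur.reverse]
      rw [ih [] (cur.reverse :: acc), ih [] [cur.reverse]]
      simp
    · simp only [pvGoSpec, if_neg hc]
      exact ih _ _

theorem pvGoSpec_ne_nil (l : List Char) : ∀ (cur : List Char) (acc : List (List Char)),
    pvGoSpec l cur acc ≠ [] := by
  induction l with
  | nil => intro cur acc; simp [pvGoSpec]
  | cons c rest ih => intro cur acc; by_cases hc : c = '#' <;> simp [pvGoSpec, hc, ih]

theorem pvGoSpec_cur (l : List Char) : ∀ (cur : List Char),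
    pvGoSpec l cur [] = (pvGoSpec l [] []).modifyHead (cur.reverse ++ ·) := by
  induction l with
  | nil => intro cur; simp [pvGoSpec]
  | cons c rest ih =>
    intro cur
    by_cases hc : c = '#'
    · subst hc
      show pvGoSpec rest [] [cur.reverse] = (pvGoSpec rest [] [[]]).modifyHead (cur.reverse ++ ·)
      rw [pvGoSpec_acc rest [] [cur.reverse], pvGoSpec_acc rest [] [[]]]
      simp
    · simp only [pvGoSpec, if_neg hc]
      rw [ih (c :: cur), ih [c]]
      cases h : pvGoSpec rest [] [] with
      | nil => exact absurd h (pvGoSpec_ne_nil rest [] [])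
      | cons p ps => simp

theorem pvSplit_nil : PySem.Chars.splitOn [] ['#'] = [[]] := by
  rw [pvSplitOn_eq]; rfl

theorem pvSplit_hash (rest : List Char) :
    PySem.Chars.splitOn ('#' :: rest) ['#'] = [] :: PySem.Chars.splitOn rest ['#'] := by
  rw [pvSplitOn_eq, pvSplitOn_eq]
  show pvGoSpec rest [] [[]] = [] :: pvGoSpec rest [] []
  rw [pvGoSpec_acc rest [] [[]]]
  simp

theorem pvSplit_cons (c : Char) (rest : List Char) (hc : c ≠ '#') :
    PySem.Chars.splitOn (c :: rest) ['#'] = (PySem.Chars.splitOn rest ['#']).modifyHead (c :: ·) := by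
  rw [pvSplitOn_eq, pvSplitOn_eq]
  simp only [pvGoSpec, if_neg hc]
  rw [pvGoSpec_cur rest [c]]
  rfl

-- A's inner loop with the first partition partially consumed (len chars, all-dash status ad)
def pvACont (sid : String) (parts : List (List Char)) (i start len : Int) (ad : Bool) (d : Int) (e : List String) : Int × List String :=
  match parts with
  | [] => (d, e)
  | p :: rest =>
    let full := len + (p.length : Int)
    if ad && p.all (fun c => c == '-') then
      pvAInner sid rest (i + 1) (start + full + 1) (d + full)
        (e ++ [pvEntry sid i start (start + full - 1) full])
    else
      pvAInner sid rest (i + 1) (start + full + 1) d e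

theorem pvACont_zero (sid : String) (parts : List (List Char)) (i start d : Int) (e : List String) :
    pvACont sid parts i start 0 true d e = pvAInner sid parts i start d e := by
  cases parts with
  | nil => rfl
  | cons p rest =>
    by_cases hp : p.all (fun c => c == '-')
    · simp [pvACont, pvAInner, hp]
    · simp [pvACont, pvAInner, hp]

theorem pvScan_eq_cont (sid : String) (cs : List Char) : ∀ (i start len : Int) (ad : Bool) (d : Int) (e : List String),
    pvBScan sid cs i start len ad d e
      = pvACont sid (PySem.Chars.splitOn cs ['#']) i start len ad d e := by
  induction cs with
  | nil =>
    intro i start len ad d e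
    rw [pvSplit_nil]
    cases ad <;> simp [pvBScan, pvACont, pvAInner]
  | cons c rest ih =>
    intro i start len ad d e
    by_cases hc : c = '#'
    · subst hc
      rw [pvSplit_hash]
      simp only [pvBScan, if_pos rfl]
      cases ad
      · simp only [Bool.false_and, if_neg (by simp : ¬ (false = true))]
        rw [ih, pvACont_zero]
        simp [pvACont]
      · rw [if_pos rfl, ih, pvACont_zero]
        simp [pvACont]
    · rw [pvSplit_cons c rest hc]
      have hcb : (c == '#') = false := by simpa using hc
      simp only [pvBScan, hcb, if_neg (by simp : ¬ (false = true))]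
      rw [ih]
      cases h : PySem.Chars.splitOn rest ['#'] with
      | nil => simp [pvACont]
      | cons p ps =>
        simp only [List.modifyHead]
        have e1 : len + 1 + (p.length : Int) = len + ((p.length : Int) + 1) := by ring
        by_cases hcd : c = '-'
        · subst hcd
          have hb : ('-' == '-') = true := rfl
          simp only [pvACont, List.all_cons, List.length_cons, hb, Bool.true_and, Bool.and_true]
          push_cast
          rw [e1]
        · have hb : (c == '-') = false := by simpa using hcd
          simp only [pvACont, List.all_cons, List.length_cons, hb, Bool.false_and, Bool.and_false,
            Bool.false_and, if_neg (by simp : ¬ (false = true))]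
          push_cast
          rw [e1]

theorem pvScan_eq_inner (sid : String) (cs : List Char) (d : Int) (e : List String) :
    pvBScan sid cs 0 0 0 true d e = pvAInner sid (PySem.Chars.splitOn cs ['#']) 0 0 d e := by
  rw [pvScan_eq_cont, pvACont_zero]

-- ===== VERDICT (by name: the statement is the Claim_ definition above) =====
theorem detect_fully_missing_partitions_spec : Claim_equal_detect_fully_missing_partitions := by
  intro alignment _
  unfold Spec_detect_fully_missing_partitions
  unfold detect_fully_missing_partitions detect_fully_missing_partitions_alt
  have : (fun (st : List String × Int × Int) (kv : String × String) =>
      let q := st.2.1 + (PySem.Str.count kv.2 "?" : Int)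
      let parts := PySem.Chars.splitOn kv.2.toList "#".toList
      let de := pvAInner kv.1 parts 0 0 st.2.2 st.1
      ((de.2, q, de.1) : List String × Int × Int))
      = (fun (st : List String × Int × Int) kv =>
      let q := st.2.1 + (PySem.Str.count kv.2 "?" : Int)
      let de := pvBScan kv.1 kv.2.toList 0 0 0 true st.2.2 st.1
      (de.2, q, de.1)) := by
    funext st kv
    simp only []
    rw [pvScan_eq_inner]
    rfl
  rw [this]
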